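-- pv_equiv track=rewrite | github.com/Dr4k3z/adv_of_code2k24 | 11-dec-24/main.py | update
-- ===== SOURCE A (Python) =====
-- from typing import Union
-- from collections import Counter,defaultdict
--
-- def rules(num: int) -> Union[tuple,int]:
--     if num == 0:
--         return [1]
--
--     num_str = str(num)
--     N = len(num_str)
--     if N % 2 == 0:
--         middle_idx = N // 2
--         return map(int, (num_str[:middle_idx], num_str[middle_idx:]))
--     return [num * 2024]
--
-- def update(data, k=3):
--     stones = Counter(int(num) for num in data)
--
--     for _ in range(k):
--         new_stones = defaultdict(int)
--         for stone,count in stones.items():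
--             for q in rules(stone):
--                 new_stones[q] += count
--         stones = new_stones
--
--     return stones
-- ===== SOURCE B (Python) =====
-- from collections import Counter, defaultdict
--
--
-- def update(data, k=3):
--     # B exploits linearity: each initial stone's k-step distribution is computed
--     # independently (once per distinct stone), then the per-stone distributions are
--     # merged scaled by that stone's multiplicity.
--
--     def evolve(stone):
--         # distribution of the stones produced by this single stone after k steps
--         dist = {stone: 1}
--         for _ in range(k):
--             nxt = {}
--             for s, c in dist.items():
--                 if s == 0:
--                     nxt[1] = nxt.get(1, 0) + c
--                 else:
--                     t = str(s)
--                     n = len(t)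
--                     if n % 2 == 0:
--                         for q in (int(t[:n // 2]), int(t[n // 2:])):
--                             nxt[q] = nxt.get(q, 0) + c
--                     else:
--                         q = s * 2024
--                         nxt[q] = nxt.get(q, 0) + c
--             dist = nxt
--         return dist
--
--     total = defaultdict(int)
--     for stone, mult in Counter(int(num) for num in data).items():
--         for v, c in evolve(stone).items():
--             total[v] += mult * c
--     return total
-- ===== Notes on version B (the rewrite author's own statement) =====
-- stated objective: alternative
-- what changed: B exploits the linearity of the stone process: it evolves each DISTINCT initial stone independently to its own k-step distribution (per-source evolution, splitting rule applied inline per case) and then merges these distributions scaled by the stone's multiplicity, instead of A's single joint k-round evolution of the whole counter via the rules() helper.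
-- outside the precondition, e.g. on update(['x'], 1): A raises ValueError, B raises ValueError; on update(['-12'], 1): A returns {-24288: 1}, B returns {-24288: 1}; on update(['-100'], 1): A returns {-1: 1, 0: 1}, B returns {-1: 1, 0: 1}
import Mathlib
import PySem

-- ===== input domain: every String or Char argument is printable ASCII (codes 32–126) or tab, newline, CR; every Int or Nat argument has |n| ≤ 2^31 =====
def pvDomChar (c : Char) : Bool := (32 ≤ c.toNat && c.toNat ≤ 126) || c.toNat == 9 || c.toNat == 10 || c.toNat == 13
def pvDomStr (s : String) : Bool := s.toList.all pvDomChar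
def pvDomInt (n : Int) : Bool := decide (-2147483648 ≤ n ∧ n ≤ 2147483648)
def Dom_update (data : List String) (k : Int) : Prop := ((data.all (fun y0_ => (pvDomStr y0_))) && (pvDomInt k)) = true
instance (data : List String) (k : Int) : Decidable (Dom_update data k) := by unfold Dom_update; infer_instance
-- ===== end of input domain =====

-- B exploits linearity: it evolves each DISTINCT initial stone independently to its own
-- k-step distribution and merges these scaled by the stone's multiplicity, instead of
-- A's single joint k-round evolution of the whole counter; same return value.

-- ===== PORT A =====
-- rules(num): the '[1]'/split/'*2024' cases; int() of a slice raises only for negative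
-- two-character str(num) (outside Pre_), ported as getD 0 there
def rulesA (num : Int) : List Int :=
  if num == 0 then [1]
  else
    let numStr := PySem.Int.toChars num
    let N : Int := (numStr.length : Int)
    if PySem.Int.mod N 2 == 0 then
      let middle := PySem.Int.floordiv N 2
      [(PySem.Int.ofChars? (PySem.List.slice numStr none (some middle))).getD 0,
       (PySem.Int.ofChars? (PySem.List.slice numStr (some middle) none)).getD 0]
    else [num * 2024]

-- int(num) raises ValueError on non-int strings (outside Pre_), ported as getD 0 there
def update (data : List String) (k : Int) : List (Int × Int) :=
  let stones : PySem.Dict Int Int :=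
    PySem.Dict.counter (data.map (fun num => (PySem.Int.ofStr? num).getD 0))
  let final := (PySem.List.pyRange 0 k).foldl
    (fun st _ =>
      st.items.foldl
        (fun nd p => (rulesA p.1).foldl (fun nd q => nd.modify q 0 (· + p.2)) nd)
        PySem.Dict.empty)
    stones
  final.items

-- ===== PORT B =====
-- evolve(stone): single-source k-step evolution, splitting rule inlined per case
def evolveB (k : Int) (stone : Int) : PySem.Dict Int Int :=
  (PySem.List.pyRange 0 k).foldl
    (fun dist _ =>
      dist.items.foldl
        (fun nxt p =>
          if p.1 == 0 then nxt.modify 1 0 (· + p.2)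
          else
            let t := PySem.Int.toChars p.1
            let n : Int := (t.length : Int)
            if PySem.Int.mod n 2 == 0 then
              [(PySem.Int.ofChars? (PySem.List.slice t none (some (PySem.Int.floordiv n 2)))).getD 0,
               (PySem.Int.ofChars? (PySem.List.slice t (some (PySem.Int.floordiv n 2)) none)).getD 0].foldl
                (fun nx q => nx.modify q 0 (· + p.2)) nxt
            else nxt.modify (p.1 * 2024) 0 (· + p.2))
        PySem.Dict.empty)
    ((PySem.Dict.empty : PySem.Dict Int Int).insert stone 1)

def update_alt (data : List String) (k : Int) : List (Int × Int) :=
  ((PySem.Dict.counter (data.map (fun num => (PySem.Int.ofStr? num).getD 0))).items.foldl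
    (fun tot sm =>
      (evolveB k sm.1).items.foldl
        (fun t p => t.modify p.1 0 (· + sm.2 * p.2)) tot)
    (PySem.Dict.empty : PySem.Dict Int Int)).items

-- ===== PRECONDITION & SPEC =====
-- Pre_update excludes (i) strings int() rejects, where A raises ValueError, and
-- (ii) for k ≥ 1 strings parsing to NEGATIVE ints: iterated splitting of a negative
-- stone can reach int('-d') which raises ValueError (e.g. ['-5'], k=1), and whether a
-- given negative input eventually does so is not expressible in closed form, so all
-- negatives are excluded even though A returns on some of them (e.g. ['-12'], k=1).
def Pre_update (data : List String) (k : Int) : Prop :=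
  (data.all (fun s =>
    match PySem.Int.ofStr? s with
    | some v => decide (k ≤ 0) || decide (0 ≤ v)
    | none => false)) = true
instance (data : List String) (k : Int) : Decidable (Pre_update data k) := by
  unfold Pre_update; infer_instance

def pvWitness_update : List String × Int := (["125", "17", "0", " +99 "], 4)

def Spec_update (data : List String) (k : Int) (out : List (Int × Int)) : Prop :=
  out = update_alt data k
instance (data : List String) (k : Int) (out : List (Int × Int)) :
    Decidable (Spec_update data k out) := by unfold Spec_update; infer_instance

-- ===== CLAIM (what is proved, stated in full; the proofs are below) =====
def Claim_equal_update : Prop :=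
  ∀ (data : List String) (k : Int), Dom_update data k → Pre_update data k →
    Spec_update data k (update data k)

-- ===== LEMMAS AND PROOFS =====

-- proof-side abstractions: every dict either program builds is `A0 w` for a weighted
-- pair list w, characterized by first-occurrence key order `fd` plus key sums `wsum`

def bump (d : PySem.Dict Int Int) (p : Int × Int) : PySem.Dict Int Int :=
  d.modify p.1 0 (· + p.2)

def A0 (w : List (Int × Int)) : PySem.Dict Int Int := w.foldl bump PySem.Dict.empty

-- first-occurrence dedup
def fd : List Int → List Int
  | [] => []
  | a :: l => a :: (fd l).filter (fun x => !(x == a))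

def wsum (q : Int) (w : List (Int × Int)) : Int :=
  ((w.filter (fun p => p.1 == q)).map (·.2)).sum

def chr (w : List (Int × Int)) : List (Int × Int) :=
  (fd (w.map (·.1))).map (fun s => (s, wsum s w))

def expand1 (w : List (Int × Int)) : List (Int × Int) :=
  w.flatMap (fun p => (rulesA p.1).map (fun q => (q, p.2)))

def expandN (L : List Int) (w : List (Int × Int)) : List (Int × Int) :=
  L.foldl (fun v _ => expand1 v) w

lemma mem_fd (x : Int) (l : List Int) : x ∈ fd l ↔ x ∈ l := by
  induction l with
  | nil => simp [fd]
  | cons a t ih =>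
      simp only [fd, List.mem_cons, List.mem_filter, ih]
      by_cases hx : x = a <;> simp [hx]

lemma fd_nodup (l : List Int) : (fd l).Nodup := by
  induction l with
  | nil => simp [fd]
  | cons a t ih =>
      simp only [fd, List.nodup_cons]
      constructor
      · intro hm
        have := (List.mem_filter.mp hm).2
        simp at this
      · exact ih.filter _

lemma fd_filter (l : List Int) (p : Int → Bool) :
    fd (l.filter p) = (fd l).filter p := by
  induction l with
  | nil => simp [fd]
  | cons a t ih =>
      by_cases hpa : p a = true
      · have h1 : (a :: t).filter p = a :: t.filter p := by simp [hpa]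
        rw [h1]
        simp only [fd, List.filter_cons, hpa, if_pos, ih]
        congr 1
        rw [List.filter_comm]
      · have h1 : (a :: t).filter p = t.filter p := by simp [hpa]
        rw [h1]
        simp only [fd, List.filter_cons, hpa]
        simp only [Bool.false_eq_true, if_neg, not_false_iff]
        rw [ih, List.filter_comm]
        symm
        apply List.filter_eq_self.mpr
        intro x hx
        have hpx : p x = true := (List.mem_filter.mp hx).2
        have hxa : x ≠ a := fun he => hpa (he ▸ hpx)
        simp [hxa]

lemma fd_append (u v : List Int) :
    fd (u ++ v) = fd u ++ (fd v).filter (fun x => decide (x ∉ u)) := by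
  induction u with
  | nil => simp [fd]
  | cons a t ih =>
      simp only [List.cons_append, fd, ih, List.filter_append, List.cons_append]
      congr 2
      rw [List.filter_filter]
      apply List.filter_congr
      intro x _
      by_cases hxa : x = a
      · subst hxa; simp
      · simp [hxa]

lemma fd_eq_self_of_nodup (l : List Int) (h : l.Nodup) : fd l = l := by
  induction l with
  | nil => simp [fd]
  | cons a t ih =>
      rcases List.nodup_cons.mp h with ⟨ha, ht⟩
      simp only [fd, ih ht]
      congr 1
      apply List.filter_eq_self.mpr
      intro x hx
      have : x ≠ a := fun he => ha (he ▸ hx)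
      simp [this]

lemma fd_idem (l : List Int) : fd (fd l) = fd l :=
  fd_eq_self_of_nodup _ (fd_nodup l)

lemma flatMap_filter_block_int (l : List Int) (g : Int → List Int) (a : Int)
    (p : Int → Bool) (hp : ∀ y ∈ g a, p y = false) :
    ((l.filter (fun x => !(x == a))).flatMap g).filter p = (l.flatMap g).filter p := by
  induction l with
  | nil => simp
  | cons b t ih =>
      by_cases hba : b = a
      · subst hba
        have hb : (!(b == b)) = false := by simp
        simp only [List.filter_cons, hb, Bool.false_eq_true, if_neg, not_false_iff,
          List.flatMap_cons, List.filter_append]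
        have hgb : (g b).filter p = [] := List.filter_eq_nil_iff.mpr (by
          intro y hy; simp [hp y hy])
        rw [ih, hgb]
        simp
      · have hb : (!(b == a)) = true := by simp [hba]
        simp only [List.filter_cons, hb, if_pos, List.flatMap_cons, List.filter_append]
        rw [ih]

-- deduplicating the sources first does not change first-occurrence target order
lemma fd_flatMap_fd (l : List Int) (g : Int → List Int) :
    fd ((fd l).flatMap g) = fd (l.flatMap g) := by
  induction l with
  | nil => simp [fd]
  | cons a t ih =>
      simp only [fd, List.flatMap_cons]
      rw [fd_append, fd_append]
      congr 1
      rw [← fd_filter, flatMap_filter_block_int (fd t) g a _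
            (by intro y hy; simp [hy]),
          fd_filter, ih]

lemma fd_flatMap_congr (l : List Int) (g g' : Int → List Int)
    (h : ∀ x ∈ l, fd (g x) = fd (g' x)) :
    fd (l.flatMap g) = fd (l.flatMap g') := by
  induction l with
  | nil => simp
  | cons a t ih =>
      simp only [List.flatMap_cons]
      rw [fd_append, fd_append]
      have hmem : ∀ y, y ∈ g a ↔ y ∈ g' a := by
        intro y
        rw [← mem_fd y (g a), ← mem_fd y (g' a), h a (by simp)]
      congr 1
      · exact h a (by simp)
      · rw [ih (fun x hx => h x (by simp [hx]))]
        apply List.filter_congr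
        intro y _
        simp [hmem y]

-- ===== wsum lemmas =====

lemma wsum_append (q : Int) (u v : List (Int × Int)) :
    wsum q (u ++ v) = wsum q u + wsum q v := by
  simp [wsum, List.filter_append]

lemma wsum_cons (q : Int) (p : Int × Int) (t : List (Int × Int)) :
    wsum q (p :: t) = (if p.1 == q then p.2 else 0) + wsum q t := by
  unfold wsum
  by_cases h : (p.1 == q) = true <;> simp [List.filter_cons, h]

lemma wsum_singleton (q : Int) (p : Int × Int) :
    wsum q [p] = if p.1 == q then p.2 else 0 := by
  by_cases h : (p.1 == q) = true <;> simp [wsum, List.filter_cons, h]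

lemma wsum_scale (q m : Int) (w : List (Int × Int)) :
    wsum q (w.map (fun p => (p.1, m * p.2))) = m * wsum q w := by
  induction w with
  | nil => simp [wsum]
  | cons p t ih =>
      simp only [List.map_cons]
      rw [wsum_cons, wsum_cons q p t, ih]
      have hfst : ((p.1, m * p.2).1 == q) = (p.1 == q) := rfl
      rw [hfst]
      by_cases h : (p.1 == q) = true
      · simp only [h, if_pos]
        ring
      · simp only [h, Bool.false_eq_true, if_neg, not_false_iff]
        ring

lemma wsum_eq_zero_of_not_mem (q : Int) (w : List (Int × Int))
    (h : q ∉ w.map (·.1)) : wsum q w = 0 := by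
  have hf : w.filter (fun p => p.1 == q) = [] := by
    apply List.filter_eq_nil_iff.mpr
    intro p hp
    have : p.1 ≠ q := fun he => h (he ▸ List.mem_map_of_mem hp)
    simp [this]
  simp [wsum, hf]

lemma filter_map_key_nodup (ns : List Int) (f : Int → Int) (q : Int) (h : ns.Nodup) :
    (ns.map (fun s => (s, f s))).filter (fun p => p.1 == q) =
      if q ∈ ns then [(q, f q)] else [] := by
  induction ns with
  | nil => simp
  | cons a t ih =>
      rcases List.nodup_cons.mp h with ⟨ha, ht⟩
      simp only [List.map_cons, List.filter_cons]
      by_cases haq : a = q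
      · subst haq
        have hb : ((a, f a).1 == a) = true := by simp
        simp only [hb, if_pos, List.mem_cons, true_or, if_pos]
        have h0 : (t.map (fun s => (s, f s))).filter (fun p => p.1 == a) = [] := by
          rw [ih ht]; simp [ha]
        simp [h0]
      · have hb : ((a, f a).1 == q) = false := by simp [haq]
        simp only [hb, Bool.false_eq_true, if_neg, not_false_iff]
        rw [ih ht]
        simp [List.mem_cons, show q ≠ a from fun h => haq h.symm]

lemma chr_keys (w : List (Int × Int)) : (chr w).map (·.1) = fd (w.map (·.1)) := by
  simp [chr, List.map_map, Function.comp_def]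

lemma wsum_chr (q : Int) (w : List (Int × Int)) : wsum q (chr w) = wsum q w := by
  unfold chr wsum
  rw [filter_map_key_nodup _ _ _ (fd_nodup _)]
  by_cases hq : q ∈ fd (w.map (·.1))
  · simp only [hq, if_pos]
    simp [wsum]
  · simp only [hq, if_neg, not_false_iff]
    rw [mem_fd] at hq
    have h0 := wsum_eq_zero_of_not_mem q w hq
    unfold wsum at h0
    simp [h0]

lemma sum_map_filter_split {α : Type} (t : List α) (p : α → Bool) (g : α → Int) :
    (t.map g).sum = ((t.filter p).map g).sum + ((t.filter (fun x => !(p x))).map g).sum := by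
  induction t with
  | nil => simp
  | cons a u ih =>
      by_cases hp : p a = true
      · simp [List.filter_cons, hp, ih]
        try ring
      · simp [List.filter_cons, hp, ih]
        try ring

lemma wsum_filter_split (s a : Int) (t : List (Int × Int)) :
    wsum s t = wsum s (t.filter (fun x => (x.1 == a)))
      + wsum s (t.filter (fun x => !(x.1 == a))) := by
  induction t with
  | nil => simp [wsum]
  | cons b v ih =>
      rw [wsum_cons, ih]
      by_cases hb : (b.1 == a) = true
      · have h1 : (b :: v).filter (fun x => (x.1 == a)) = b :: v.filter (fun x => (x.1 == a)) := by
          simp [hb]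
        have h2 : (b :: v).filter (fun x => !(x.1 == a)) = v.filter (fun x => !(x.1 == a)) := by
          simp [hb]
        rw [h1, h2, wsum_cons s b]
        ring
      · have h1 : (b :: v).filter (fun x => (x.1 == a)) = v.filter (fun x => (x.1 == a)) := by
          simp [hb]
        have h2 : (b :: v).filter (fun x => !(x.1 == a)) = b :: v.filter (fun x => !(x.1 == a)) := by
          simp [hb]
        rw [h1, h2, wsum_cons s b]
        ring

-- grouping: summing p.2 * f p.1 over a weighted list = summing wsum * f over its
-- distinct keys in first-occurrence order
lemma sum_fd_group (w : List (Int × Int)) (f : Int → Int) :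
    ((fd (w.map (·.1))).map (fun s => wsum s w * f s)).sum =
      (w.map (fun p => p.2 * f p.1)).sum := by
  induction hn : w.length using Nat.strong_induction_on generalizing w with
  | _ n ih =>
    cases w with
    | nil => simp [fd]
    | cons p t =>
        have hlen : (t.filter (fun x => !(x.1 == p.1))).length < n := by
          rw [← hn]
          simp only [List.length_cons]
          exact Nat.lt_succ_of_le (List.length_filter_le _ _)
        have hkeys : (t.filter (fun x => !(x.1 == p.1))).map (·.1)
            = (t.map (·.1)).filter (fun x => !(x == p.1)) := by
          rw [List.filter_map]; rfl
        have hfdt : fd ((t.filter (fun x => !(x.1 == p.1))).map (·.1))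
            = (fd (t.map (·.1))).filter (fun x => !(x == p.1)) := by
          rw [hkeys, fd_filter]
        have hws : ∀ s ∈ fd ((t.filter (fun x => !(x.1 == p.1))).map (·.1)),
            wsum s (p :: t) = wsum s (t.filter (fun x => !(x.1 == p.1))) := by
          intro s hs
          have hsa : s ≠ p.1 := by
            rw [hfdt] at hs
            have h2 := (List.mem_filter.mp hs).2
            simpa using h2
          rw [wsum_cons]
          have hb : (p.1 == s) = false := by
            simp only [beq_eq_false_iff_ne, ne_eq]
            exact fun he => hsa he.symm
          rw [hb]
          simp only [Bool.false_eq_true, if_neg, not_false_iff, zero_add]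
          rw [wsum_filter_split s p.1 t]
          have hza : wsum s (t.filter (fun x => (x.1 == p.1))) = 0 := by
            apply wsum_eq_zero_of_not_mem
            intro hm
            rcases List.mem_map.mp hm with ⟨x, hx, hxs⟩
            apply hsa
            rw [← hxs]
            simpa using (List.mem_filter.mp hx).2
          rw [hza, zero_add]
        have hwa : wsum p.1 (p :: t)
            = p.2 + wsum p.1 (t.filter (fun x => (x.1 == p.1))) := by
          rw [wsum_cons]
          have hb : (p.1 == p.1) = true := by simp
          rw [hb]
          simp only [if_pos]
          have hzb : wsum p.1 (t.filter (fun x => !(x.1 == p.1))) = 0 := by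
            apply wsum_eq_zero_of_not_mem
            intro hm
            rcases List.mem_map.mp hm with ⟨x, hx, hxs⟩
            have h2 := (List.mem_filter.mp hx).2
            rw [hxs] at h2
            simp at h2
          rw [wsum_filter_split p.1 p.1 t, hzb, add_zero]
        have hsplit : (t.map (fun r => r.2 * f r.1)).sum =
            ((t.filter (fun x => (x.1 == p.1))).map (fun r => r.2 * f r.1)).sum
              + ((t.filter (fun x => !(x.1 == p.1))).map (fun r => r.2 * f r.1)).sum :=
          sum_map_filter_split t (fun x => x.1 == p.1) _
        have hta_sum : ∀ u : List (Int × Int),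
            ((u.filter (fun x => (x.1 == p.1))).map (fun r => r.2 * f r.1)).sum
              = wsum p.1 (u.filter (fun x => (x.1 == p.1))) * f p.1 := by
          intro u
          induction u with
          | nil => simp [wsum]
          | cons b v ihv =>
              by_cases hb : (b.1 == p.1) = true
              · have hba : b.1 = p.1 := by simpa using hb
                simp only [List.filter_cons, hb, if_pos, List.map_cons, List.sum_cons]
                rw [ihv, wsum_cons, hb]
                simp only [if_pos, hba]
                ring
              · simp only [List.filter_cons, hb, Bool.false_eq_true, if_neg, not_false_iff]
                exact ihv
        calc ((fd ((p :: t).map (·.1))).map (fun s => wsum s (p :: t) * f s)).sum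
            = wsum p.1 (p :: t) * f p.1 +
              ((fd ((t.filter (fun x => !(x.1 == p.1))).map (·.1))).map
                (fun s => wsum s (p :: t) * f s)).sum := by
              simp only [List.map_cons, fd, List.sum_cons]
              rw [hfdt]
          _ = wsum p.1 (p :: t) * f p.1 +
              ((fd ((t.filter (fun x => !(x.1 == p.1))).map (·.1))).map
                (fun s => wsum s (t.filter (fun x => !(x.1 == p.1))) * f s)).sum := by
              congr 1
              apply congrArg
              exact List.map_congr_left (fun s hs => by rw [hws s hs])
          _ = (p.2 + wsum p.1 (t.filter (fun x => (x.1 == p.1)))) * f p.1 +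
              ((t.filter (fun x => !(x.1 == p.1))).map (fun r => r.2 * f r.1)).sum := by
              rw [hwa, ih _ hlen _ rfl]
          _ = p.2 * f p.1 +
              (((t.filter (fun x => (x.1 == p.1))).map (fun r => r.2 * f r.1)).sum
                + ((t.filter (fun x => !(x.1 == p.1))).map (fun r => r.2 * f r.1)).sum) := by
              rw [hta_sum t]
              ring
          _ = ((p :: t).map (fun r => r.2 * f r.1)).sum := by
              simp only [List.map_cons, List.sum_cons]
              rw [hsplit]

-- ===== dict characterization =====

lemma modify_eq_insert (d : PySem.Dict Int Int) (q c : Int) :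
    d.modify q 0 (· + c) = d.insert q (d.getD q 0 + c) := rfl

lemma fd_singleton (a : Int) : fd [a] = [a] := by simp [fd]

lemma fd_append_singleton_mem (u : List Int) (a : Int) (h : a ∈ u) :
    fd (u ++ [a]) = fd u := by
  rw [fd_append, fd_singleton]
  have h0 : ([a].filter (fun x => decide (x ∉ u))) = [] := by
    simp only [List.filter_cons, List.filter_nil]
    simp [h]
  rw [h0]
  simp

lemma fd_append_singleton_not_mem (u : List Int) (a : Int) (h : a ∉ u) :
    fd (u ++ [a]) = fd u ++ [a] := by
  rw [fd_append, fd_singleton]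
  have h0 : ([a].filter (fun x => decide (x ∉ u))) = [a] := by
    simp only [List.filter_cons, List.filter_nil]
    simp [h]
  rw [h0]

lemma bump_chr (u : List (Int × Int)) (d : PySem.Dict Int Int) (p : Int × Int)
    (h : d.items = chr u) : (bump d p).items = chr (u ++ [p]) := by
  have hkeys : d.keys = fd (u.map (·.1)) := by
    show d.items.map (·.1) = _
    rw [h, chr_keys]
  have hnd : d.keys.Nodup := by rw [hkeys]; exact fd_nodup _
  unfold bump
  rw [modify_eq_insert]
  have hmapkeys : (u ++ [p]).map (·.1) = u.map (·.1) ++ [p.1] := by simp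
  by_cases hc : p.1 ∈ u.map (·.1)
  · have hmemk : p.1 ∈ d.keys := by rw [hkeys, mem_fd]; exact hc
    have hcont : d.contains p.1 = true := (PySem.Dict.contains_iff_mem_keys d p.1).mpr hmemk
    have hgd : d.getD p.1 0 = wsum p.1 u := by
      apply PySem.Dict.getD_of_mem_items
      · rw [h]
        unfold chr
        exact List.mem_map_of_mem (by rw [mem_fd]; exact hc)
      · exact hnd
    rw [PySem.Dict.items_insert_of_contains _ _ hcont, h]
    unfold chr
    rw [hmapkeys, fd_append_singleton_mem _ _ hc, List.map_map]
    apply List.map_congr_left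
    intro s hs
    simp only [Function.comp_apply]
    by_cases hsp : s = p.1
    · have hb : (s == p.1) = true := by simp [hsp]
      simp only [hb, if_pos]
      rw [wsum_append, wsum_singleton]
      have hb2 : (p.1 == s) = true := by simp [hsp]
      rw [hb2]
      simp only [if_pos]
      rw [hgd, hsp]
    · have hb : (s == p.1) = false := by simp [hsp]
      simp only [hb, Bool.false_eq_true, if_neg, not_false_iff]
      rw [wsum_append, wsum_singleton]
      have hb2 : (p.1 == s) = false := by
        simp only [beq_eq_false_iff_ne, ne_eq]
        exact fun he => hsp he.symm
      rw [hb2]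
      simp
  · have hmemk : p.1 ∉ d.keys := by rw [hkeys, mem_fd]; exact hc
    have hcont : d.contains p.1 = false := by
      by_contra hcc
      have : d.contains p.1 = true := by simpa using hcc
      exact hmemk ((PySem.Dict.contains_iff_mem_keys d p.1).mp this)
    have hgd : d.getD p.1 0 = 0 := PySem.Dict.getD_of_not_contains _ 0 hcont
    rw [PySem.Dict.items_insert_of_not_contains _ _ hcont, h]
    unfold chr
    rw [hmapkeys, fd_append_singleton_not_mem _ _ hc, List.map_append]
    congr 1
    · apply List.map_congr_left
      intro s hs
      have hsp : s ≠ p.1 := by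
        intro he
        rw [mem_fd] at hs
        exact hc (he ▸ hs)
      rw [wsum_append, wsum_singleton]
      have hb2 : (p.1 == s) = false := by
        simp only [beq_eq_false_iff_ne, ne_eq]
        exact fun he => hsp he.symm
      rw [hb2]
      simp
    · simp only [List.map_cons, List.map_nil]
      rw [hgd, wsum_append, wsum_singleton]
      have h0 := wsum_eq_zero_of_not_mem p.1 u hc
      simp [h0]

lemma items_A0_aux (w : List (Int × Int)) :
    ∀ (u : List (Int × Int)) (d : PySem.Dict Int Int), d.items = chr u →
      (w.foldl bump d).items = chr (u ++ w) := by
  induction w with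
  | nil => intro u d h; simpa using h
  | cons p t ih =>
      intro u d h
      have h1 : (bump d p).items = chr (u ++ [p]) := bump_chr u d p h
      have := ih (u ++ [p]) (bump d p) h1
      simpa [List.append_assoc] using this

lemma items_A0 (w : List (Int × Int)) : (A0 w).items = chr w := by
  have h := items_A0_aux w [] PySem.Dict.empty (by rfl)
  simpa using h

-- ===== fold restructuring =====

lemma foldl_flatMap {α β γ : Type} (l : List α) (g : α → List β) (f : γ → β → γ) (i : γ) :
    (l.flatMap g).foldl f i = l.foldl (fun a x => (g x).foldl f a) i := by
  induction l generalizing i with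
  | nil => rfl
  | cons a t ih => simp [List.flatMap_cons, List.foldl_append, ih]

lemma roundA_eq (l : List (Int × Int)) :
    l.foldl (fun nd p => (rulesA p.1).foldl (fun nd q => nd.modify q 0 (· + p.2)) nd)
        PySem.Dict.empty = A0 (expand1 l) := by
  unfold A0 expand1
  rw [foldl_flatMap]
  simp only [List.foldl_map]
  rfl

lemma chr_congr (v v' : List (Int × Int))
    (hk : fd (v.map (·.1)) = fd (v'.map (·.1)))
    (hw : ∀ q, wsum q v = wsum q v') : chr v = chr v' := by
  unfold chr
  rw [hk]
  exact List.map_congr_left (fun s _ => by rw [hw s])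

lemma expand1_keys (w : List (Int × Int)) :
    (expand1 w).map (·.1) = (w.map (·.1)).flatMap rulesA := by
  simp [expand1, List.map_flatMap, List.flatMap_map, List.map_map, Function.comp_def]

lemma wsum_block (q c : Int) (rl : List Int) :
    wsum q (rl.map (fun r => (r, c))) = c * (rl.count q : Int) := by
  induction rl with
  | nil => simp [wsum]
  | cons r u ih =>
      simp only [List.map_cons]
      rw [wsum_cons, ih, List.count_cons]
      have hfst : ((r, c).1 == q) = (r == q) := rfl
      rw [hfst]
      by_cases h : (r == q) = true
      · simp only [h, if_pos]
        push_cast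
        ring
      · simp only [h, Bool.false_eq_true, if_neg, not_false_iff]
        simp [h]

lemma wsum_flatMap {α : Type} (q : Int) (l : List α) (g : α → List (Int × Int)) :
    wsum q (l.flatMap g) = (l.map (fun x => wsum q (g x))).sum := by
  induction l with
  | nil => simp [wsum]
  | cons a t ih => simp [List.flatMap_cons, wsum_append, ih]

lemma wsum_expand1 (q : Int) (w : List (Int × Int)) :
    wsum q (expand1 w) = (w.map (fun p => p.2 * ((rulesA p.1).count q : Int))).sum := by
  unfold expand1
  rw [wsum_flatMap]
  congr 1
  exact List.map_congr_left (fun p _ => wsum_block q p.2 (rulesA p.1))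

lemma chr_expand1_chr (w : List (Int × Int)) :
    chr (expand1 (chr w)) = chr (expand1 w) := by
  apply chr_congr
  · rw [expand1_keys, expand1_keys, chr_keys]
    exact fd_flatMap_fd _ _
  · intro q
    rw [wsum_expand1, wsum_expand1]
    have h1 : (chr w).map (fun p => p.2 * ((rulesA p.1).count q : Int))
        = (fd (w.map (·.1))).map (fun s => wsum s w * ((rulesA s).count q : Int)) := by
      unfold chr
      rw [List.map_map]
      rfl
    rw [h1, sum_fd_group w (fun s => ((rulesA s).count q : Int))]

-- the k-round loop (A's shape) turns chr w into chr (expandN L w)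
lemma rounds_chr (L : List Int) :
    ∀ (d : PySem.Dict Int Int) (w : List (Int × Int)), d.items = chr w →
      (L.foldl (fun st _ =>
          st.items.foldl
            (fun nd p => (rulesA p.1).foldl (fun nd q => nd.modify q 0 (· + p.2)) nd)
            PySem.Dict.empty) d).items = chr (expandN L w) := by
  induction L with
  | nil => intro d w h; simpa [expandN] using h
  | cons x t ih =>
      intro d w h
      simp only [List.foldl_cons]
      have hstep : (d.items.foldl
          (fun nd p => (rulesA p.1).foldl (fun nd q => nd.modify q 0 (· + p.2)) nd)
          PySem.Dict.empty).items = chr (expand1 w) := by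
        rw [h, roundA_eq, items_A0, chr_expand1_chr]
      have := ih _ (expand1 w) hstep
      rw [this]
      rfl

-- ===== expandN distribution lemmas =====

lemma expand1_flatMap {α : Type} (l : List α) (g : α → List (Int × Int)) :
    expand1 (l.flatMap g) = l.flatMap (fun x => expand1 (g x)) := by
  simp [expand1, List.flatMap_assoc]

lemma expandN_cons (x : Int) (L : List Int) (w : List (Int × Int)) :
    expandN (x :: L) w = expandN L (expand1 w) := rfl

lemma expandN_flatMap {α : Type} (L : List Int) (l : List α) (g : α → List (Int × Int)) :
    expandN L (l.flatMap g) = l.flatMap (fun x => expandN L (g x)) := by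
  induction L generalizing g with
  | nil => rfl
  | cons x t ih =>
      rw [expandN_cons, expand1_flatMap, ih (fun x => expand1 (g x))]
      rfl

lemma counter_eq_A0 (ys : List Int) :
    PySem.Dict.counter ys = A0 (ys.map (fun s => (s, (1 : Int)))) := by
  rw [PySem.Dict.counter_eq_foldl]
  unfold A0
  rw [List.foldl_map]
  rfl

-- B's inlined per-stone body is A's rules-driven body
lemma evolve_body_eq (nxt : PySem.Dict Int Int) (p : Int × Int) :
    (if p.1 == 0 then nxt.modify 1 0 (· + p.2)
     else
       let t := PySem.Int.toChars p.1
       let n : Int := (t.length : Int)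
       if PySem.Int.mod n 2 == 0 then
         [(PySem.Int.ofChars? (PySem.List.slice t none (some (PySem.Int.floordiv n 2)))).getD 0,
          (PySem.Int.ofChars? (PySem.List.slice t (some (PySem.Int.floordiv n 2)) none)).getD 0].foldl
           (fun nx q => nx.modify q 0 (· + p.2)) nxt
       else nxt.modify (p.1 * 2024) 0 (· + p.2))
    = (rulesA p.1).foldl (fun nx q => nx.modify q 0 (· + p.2)) nxt := by
  unfold rulesA
  by_cases h0 : (p.1 == 0) = true
  · simp [h0]
  · simp only [h0, Bool.false_eq_true, if_neg, not_false_iff]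
    by_cases he : (PySem.Int.mod ((PySem.Int.toChars p.1).length : Int) 2 == 0) = true
    · simp only [he, if_pos]
    · simp only [he, Bool.false_eq_true, if_neg, not_false_iff]
      simp only [List.foldl_cons, List.foldl_nil]

lemma evolveB_items (k : Int) (s : Int) :
    (evolveB k s).items = chr (expandN (PySem.List.pyRange 0 k) [(s, 1)]) := by
  unfold evolveB
  have hbody : (fun (nxt : PySem.Dict Int Int) (p : Int × Int) =>
      if p.1 == 0 then nxt.modify 1 0 (· + p.2)
      else
        let t := PySem.Int.toChars p.1
        let n : Int := (t.length : Int)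
        if PySem.Int.mod n 2 == 0 then
          [(PySem.Int.ofChars? (PySem.List.slice t none (some (PySem.Int.floordiv n 2)))).getD 0,
           (PySem.Int.ofChars? (PySem.List.slice t (some (PySem.Int.floordiv n 2)) none)).getD 0].foldl
            (fun nx q => nx.modify q 0 (· + p.2)) nxt
        else nxt.modify (p.1 * 2024) 0 (· + p.2))
      = (fun (nd : PySem.Dict Int Int) (p : Int × Int) =>
          (rulesA p.1).foldl (fun nd q => nd.modify q 0 (· + p.2)) nd) := by
    funext nxt p
    exact evolve_body_eq nxt p
  rw [hbody]
  apply rounds_chr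
  have hins : ((PySem.Dict.empty : PySem.Dict Int Int).insert s 1).items = [(s, 1)] := by
    rfl
  rw [hins]
  have hch : chr [(s, (1 : Int))] = [(s, (1 : Int))] := by
    unfold chr
    simp [fd, wsum]
  rw [hch]

lemma map_eq_flatMap_singleton (l : List Int) :
    l.map (fun s => (s, (1 : Int))) = l.flatMap (fun s => [(s, (1 : Int))]) := by
  induction l with
  | nil => rfl
  | cons a t ih => simp [ih]

-- ===== VERDICT (by name: the statement is the Claim_ definition above) =====
theorem update_spec : Claim_equal_update := by
  unfold Claim_equal_update Spec_update
  intro data k _ _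
  show update data k = update_alt data k
  unfold update update_alt
  set ys := data.map (fun num => (PySem.Int.ofStr? num).getD 0) with hys
  set L := PySem.List.pyRange 0 k with hL
  set w0 : List (Int × Int) := ys.map (fun s => (s, (1 : Int))) with hw0
  -- A's side: the joint k-round evolution of the counter
  have hA : (L.foldl (fun st _ =>
      st.items.foldl
        (fun nd p => (rulesA p.1).foldl (fun nd q => nd.modify q 0 (· + p.2)) nd)
        PySem.Dict.empty) (PySem.Dict.counter ys)).items = chr (expandN L w0) := by
    apply rounds_chr
    rw [counter_eq_A0, items_A0]
  -- B's side: per-source evolutions merged scaled by multiplicity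
  have hCitems : (PySem.Dict.counter ys).items = chr w0 := by
    rw [counter_eq_A0, items_A0]
  have hfun : (fun (tot : PySem.Dict Int Int) (sm : Int × Int) =>
        (evolveB k sm.1).items.foldl
          (fun t p => t.modify p.1 0 (· + sm.2 * p.2)) tot)
      = (fun (tot : PySem.Dict Int Int) (sm : Int × Int) =>
        ((evolveB k sm.1).items.map (fun p => (p.1, sm.2 * p.2))).foldl bump tot) := by
    funext tot sm
    rw [List.foldl_map]
    rfl
  have hBfold : ((PySem.Dict.counter ys).items.foldl
      (fun tot sm => (evolveB k sm.1).items.foldl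
        (fun t p => t.modify p.1 0 (· + sm.2 * p.2)) tot)
      (PySem.Dict.empty : PySem.Dict Int Int))
      = A0 ((PySem.Dict.counter ys).items.flatMap
          (fun sm => (evolveB k sm.1).items.map (fun p => (p.1, sm.2 * p.2)))) := by
    rw [hfun]
    unfold A0
    rw [foldl_flatMap]
  rw [hA, hBfold, items_A0]
  -- reduce both pair lists to chr-equality
  set E : Int → List (Int × Int) := fun s => expandN L [(s, 1)] with hE
  have hEv : ∀ sm : Int × Int, (evolveB k sm.1).items = chr (E sm.1) := by
    intro sm
    rw [evolveB_items, hE, hL]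
  have hWb : ((PySem.Dict.counter ys).items.flatMap
        (fun sm => (evolveB k sm.1).items.map (fun p => (p.1, sm.2 * p.2))))
      = (chr w0).flatMap (fun sm => (chr (E sm.1)).map (fun p => (p.1, sm.2 * p.2))) := by
    rw [hCitems]
    apply List.flatMap_congr
    intro sm _
    rw [hEv sm]
  rw [hWb]
  have hw0flat : w0 = ys.flatMap (fun s => [(s, (1 : Int))]) := by
    rw [hw0]
    exact map_eq_flatMap_singleton ys
  have hWa : expandN L w0 = ys.flatMap (fun s => E s) := by
    rw [hw0flat, expandN_flatMap]
  have hw0keys : w0.map (·.1) = ys := by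
    rw [hw0]
    simp [List.map_map, Function.comp_def]
  rw [hWa]
  apply chr_congr
  · -- first-occurrence key order agrees
    have hkb : ((chr w0).flatMap
          (fun sm => (chr (E sm.1)).map (fun p => (p.1, sm.2 * p.2)))).map (·.1)
        = (fd ys).flatMap (fun s => fd ((E s).map (·.1))) := by
      rw [List.map_flatMap]
      have h1 : (fun (sm : Int × Int) =>
            ((chr (E sm.1)).map (fun p => (p.1, sm.2 * p.2))).map (·.1))
          = fun sm => fd ((E sm.1).map (·.1)) := by
        funext sm
        rw [List.map_map]
        have : ((·.1) ∘ fun (p : Int × Int) => (p.1, sm.2 * p.2)) = (·.1) := by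
          funext p; rfl
        rw [this, chr_keys]
      rw [h1]
      unfold chr
      rw [hw0keys, List.flatMap_map]
    have hka : ((ys.flatMap (fun s => E s)).map (·.1))
        = ys.flatMap (fun s => (E s).map (·.1)) := by
      rw [List.map_flatMap]
    calc fd (((ys.flatMap fun s => E s)).map (·.1))
        = fd (ys.flatMap (fun s => (E s).map (·.1))) := by rw [hka]
      _ = fd ((fd ys).flatMap (fun s => (E s).map (·.1))) := (fd_flatMap_fd _ _).symm
      _ = fd ((fd ys).flatMap (fun s => fd ((E s).map (·.1)))) :=
          fd_flatMap_congr _ _ _ (fun x _ => (fd_idem _).symm)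
      _ = fd ((((chr w0).flatMap
            (fun sm => (chr (E sm.1)).map (fun p => (p.1, sm.2 * p.2))))).map (·.1)) := by
          rw [hkb]
  · -- weighted sums agree
    intro q
    rw [wsum_flatMap, wsum_flatMap]
    have h1 : (chr w0).map
          (fun sm => wsum q ((chr (E sm.1)).map (fun p => (p.1, sm.2 * p.2))))
        = (chr w0).map (fun sm => sm.2 * wsum q (E sm.1)) := by
      apply List.map_congr_left
      intro sm _
      rw [wsum_scale, wsum_chr]
    rw [h1]
    have h2 : (chr w0).map (fun sm => sm.2 * wsum q (E sm.1))
        = (fd (w0.map (·.1))).map (fun s => wsum s w0 * wsum q (E s)) := by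
      unfold chr
      rw [List.map_map]
      rfl
    rw [h2, sum_fd_group w0 (fun s => wsum q (E s))]
    have h3 : w0.map (fun p => p.2 * wsum q (E p.1))
        = ys.map (fun s => 1 * wsum q (E s)) := by
      rw [hw0, List.map_map]
      rfl
    rw [h3]
    apply congrArg
    exact List.map_congr_left (fun s _ => (one_mul _).symm)
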